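-- pv_equiv track=rewrite | github.com/jgfranco/formation | 2023_09/stringSpeedDrill7.py | solution
-- ===== SOURCE A (Python) =====
-- def solution(s):
--
--     vowels = ['a', 'e', 'i', 'o', 'u']
--     SUM = 0
--     for char in s:
--         if char in vowels:
--             SUM +=1
--         else:
--             SUM += 2
--
--     return SUM
-- ===== SOURCE B (Python) =====
-- def solution(s):
--     counts = {}
--     for ch in s:
--         counts[ch] = counts.get(ch, 0) + 1
--     return sum(n * (1 if ch in 'aeiou' else 2) for ch, n in counts.items())
-- ===== Notes on version B (the rewrite author's own statement) =====
-- stated objective: alternative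
-- what changed: B first builds a character-frequency dictionary, then computes the total as a weighted sum over the distinct characters (count times 1 or 2), instead of A's per-character branch-and-accumulate loop.
import Mathlib
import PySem

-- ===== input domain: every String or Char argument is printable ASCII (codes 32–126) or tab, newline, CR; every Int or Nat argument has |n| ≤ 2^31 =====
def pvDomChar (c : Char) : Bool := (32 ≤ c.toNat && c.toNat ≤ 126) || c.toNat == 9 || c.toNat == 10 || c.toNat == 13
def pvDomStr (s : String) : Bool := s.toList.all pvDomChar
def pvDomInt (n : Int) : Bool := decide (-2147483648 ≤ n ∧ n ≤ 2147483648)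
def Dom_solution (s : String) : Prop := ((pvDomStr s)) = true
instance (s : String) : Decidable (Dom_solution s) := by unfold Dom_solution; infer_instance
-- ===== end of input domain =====

-- B builds a character-frequency dictionary first and then takes a weighted sum over the
-- distinct characters, instead of A's per-character branch-and-accumulate loop.

-- ===== PORT A =====
-- for char in s: SUM += 1 if char in vowels else 2
def solution (s : String) : Int :=
  s.toList.foldl (fun SUM char =>
    if char ∈ ['a', 'e', 'i', 'o', 'u'] then SUM + 1 else SUM + 2) 0

-- ===== PORT B =====
-- counts[ch] = counts.get(ch, 0) + 1 for each ch, then sum n * (1 or 2) over counts.items()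
def solution_alt (s : String) : Int :=
  let counts : PySem.Dict Char Int :=
    s.toList.foldl (fun d ch => d.insert ch (d.getD ch 0 + 1)) PySem.Dict.empty
  (counts.items.map (fun p => p.2 * (if p.1 ∈ "aeiou".toList then (1 : Int) else 2))).sum

-- ===== PRECONDITION & SPEC =====
def Spec_solution (s : String) (out : Int) : Prop := out = solution_alt s
instance (s : String) (out : Int) : Decidable (Spec_solution s out) := by unfold Spec_solution; infer_instance

-- ===== CLAIM (what is proved, stated in full; the proofs are below) =====
def Claim_equal_solution : Prop := ∀ (s : String), Dom_solution s → Spec_solution s (solution s)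

-- ===== LEMMAS AND PROOFS =====

-- the per-character weight both programs realise
def pvW (c : Char) : Int := if c ∈ ['a', 'e', 'i', 'o', 'u'] then 1 else 2

-- A's loop is the sum of pvW over the characters
lemma solution_foldl_eq (l : List Char) (acc : Int) :
    l.foldl (fun SUM char =>
      if char ∈ ['a', 'e', 'i', 'o', 'u'] then SUM + 1 else SUM + 2) acc
    = acc + (l.map pvW).sum := by
  induction l generalizing acc with
  | nil => simp
  | cons c t ih =>
    simp only [List.foldl_cons, List.map_cons, List.sum_cons, ih, pvW]
    by_cases h : c ∈ ['a','e','i','o','u'] <;> simp [h] <;> ring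

-- summing an indicator weight over a nodup list containing x picks out w x
lemma sum_map_indicator (d : List Char) (x : Char) (w : Char → Int)
    (hnd : d.Nodup) (hx : x ∈ d) :
    (d.map (fun k => (if k = x then (1 : Int) else 0) * w k)).sum = w x := by
  induction d with
  | nil => simp at hx
  | cons a t ih =>
    rw [List.nodup_cons] at hnd
    by_cases h : a = x
    · subst h
      have hz : (t.map (fun k => (if k = a then (1 : Int) else 0) * w k)).sum = 0 := by
        apply List.sum_eq_zero
        intro y hy
        obtain ⟨k, hk, rfl⟩ := List.mem_map.mp hy
        have hne : k ≠ a := fun he => hnd.1 (he ▸ hk)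
        simp [hne]
      rw [List.map_cons, List.sum_cons, if_pos rfl, one_mul, hz, add_zero]
    · have hxt : x ∈ t := by
        rcases List.mem_cons.mp hx with h' | h'
        · exact absurd h'.symm h
        · exact h'
      rw [List.map_cons, List.sum_cons, if_neg h, zero_mul, zero_add, ih hnd.2 hxt]

-- weighted sum of counts over distinct characters equals the plain sum over the list
lemma sum_counts_eq (l d : List Char) (w : Char → Int)
    (hnd : d.Nodup) (hmem : ∀ x, x ∈ l → x ∈ d) :
    (d.map (fun k => (l.count k : Int) * w k)).sum = (l.map w).sum := by
  induction l with
  | nil => simp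
  | cons x t ih =>
    have hx : x ∈ d := hmem x (List.mem_cons_self)
    have hmem' : ∀ y, y ∈ t → y ∈ d := fun y hy => hmem y (List.mem_cons_of_mem _ hy)
    have hsplit : ∀ k : Char, ((x :: t).count k : Int) * w k
        = (t.count k : Int) * w k + (if k = x then (1 : Int) else 0) * w k := by
      intro k
      by_cases h : k = x
      · subst h; simp; ring
      · have h' : x ≠ k := fun he => h he.symm
        simp [h, h']
    calc (d.map (fun k => ((x :: t).count k : Int) * w k)).sum
        = (d.map (fun k => (t.count k : Int) * w k
            + (if k = x then (1 : Int) else 0) * w k)).sum := by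
          congr 1; exact List.map_congr_left (fun k _ => hsplit k)
      _ = (d.map (fun k => (t.count k : Int) * w k)).sum
            + (d.map (fun k => (if k = x then (1 : Int) else 0) * w k)).sum := by
          simp
      _ = (t.map w).sum + w x := by
          rw [ih hmem', sum_map_indicator d x w hnd hx]
      _ = ((x :: t).map w).sum := by simp; ring

-- ===== VERDICT (by name: the statement is the Claim_ definition above) =====
theorem solution_spec : Claim_equal_solution := by
  intro s _
  unfold Spec_solution solution solution_alt
  rw [solution_foldl_eq, PySem.Dict.foldl_insert_getD_add_one_eq_counter]
  show _ = (((PySem.Dict.counter s.toList).items).map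
      (fun p => p.2 * (if p.1 ∈ "aeiou".toList then (1 : Int) else 2))).sum
  rw [PySem.Dict.items_counter, List.map_map]
  have hae : "aeiou".toList = ['a','e','i','o','u'] := by decide
  have hcomp : ((fun p : Char × Int => p.2 * (if p.1 ∈ "aeiou".toList then (1 : Int) else 2))
      ∘ fun k => (k, (s.toList.count k : Int)))
      = fun k => (s.toList.count k : Int) * pvW k := by
    funext k
    simp [pvW, hae, Function.comp]
  rw [hcomp, sum_counts_eq s.toList (PySem.Set.ofList s.toList) pvW
    (PySem.Set.nodup_ofList _) (fun x hx => (PySem.Set.mem_ofList _ _).mpr hx)]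
  simp
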